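-- pv_equiv track=rewrite | github.com/byte-sec/Discord-Media-Scraper | utils.py | _get_pagination_nav
-- ===== SOURCE A (Python) =====
-- def _get_pagination_nav(current_page: int, total_pages: int) -> str:
--     """Creates a smart pagination navigation with ellipses."""
--     if total_pages <= 1:
--         return ""
--
--     nav = "<div class='pagination'>"
--
--     # Previous button
--     if current_page > 1:
--         nav += f"<a href='_page-{current_page - 1}.html'>&larr; Previous</a>"
--
--     # Page numbers
--     if total_pages <= 7: # Show all pages if 7 or fewer
--         for i in range(1, total_pages + 1):
--             nav += f"<a href='_page-{i}.html' class='{'current-page' if i == current_page else ''}'>{i}</a>"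
--     else:
--         # Always show first page
--         nav += f"<a href='_page-1.html' class='{'current-page' if 1 == current_page else ''}'>1</a>"
--
--         # Ellipsis and pages around current page
--         if current_page > 4:
--             nav += "<span class='ellipsis'>...</span>"
--
--         start = max(2, current_page - 2)
--         end = min(total_pages - 1, current_page + 2)
--
--         for i in range(start, end + 1):
--             nav += f"<a href='_page-{i}.html' class='{'current-page' if i == current_page else ''}'>{i}</a>"
--
--         if current_page < total_pages - 3:
--             nav += "<span class='ellipsis'>...</span>"
--
--         # Always show last page
--         nav += f"<a href='_page-{total_pages}.html' class='{'current-page' if total_pages == current_page else ''}'>{total_pages}</a>"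
--
--     # Next button
--     if current_page < total_pages:
--         nav += f"<a href='_page-{current_page + 1}.html'>Next &rarr;</a>"
--
--     nav += "</div>"
--     return nav
-- ===== SOURCE B (Python) =====
-- def _get_pagination_nav(current_page: int, total_pages: int) -> str:
--     """Smart pagination nav: precompute the list of page numbers, then render
--     it in one gap-driven pass (a gap > 1 between neighbours becomes an ellipsis)."""
--     if total_pages <= 1:
--         return ""
--
--     if total_pages <= 7:
--         pages = list(range(1, total_pages + 1))
--     else:
--         pages = ([1]
--                  + list(range(max(2, current_page - 2),
--                               min(total_pages - 1, current_page + 2) + 1))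
--                  + [total_pages])
--
--     def link(i):
--         cls = 'current-page' if i == current_page else ''
--         return f"<a href='_page-{i}.html' class='{cls}'>{i}</a>"
--
--     parts = ["<div class='pagination'>"]
--     if current_page > 1:
--         parts.append(f"<a href='_page-{current_page - 1}.html'>&larr; Previous</a>")
--     parts.append(link(pages[0]))
--     for prev, p in zip(pages, pages[1:]):
--         if p - prev > 1:
--             parts.append("<span class='ellipsis'>...</span>")
--         parts.append(link(p))
--     if current_page < total_pages:
--         parts.append(f"<a href='_page-{current_page + 1}.html'>Next &rarr;</a>")
--     parts.append("</div>")
--     return "".join(parts)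
-- ===== Notes on version B (the rewrite author's own statement) =====
-- stated objective: simpler
-- what changed: A interleaves HTML emission with two separate branch structures and explicit ellipsis guards; B first computes the list of page numbers to display and then renders it in a single gap-driven pass (an ellipsis exactly where consecutive displayed pages differ by more than 1), joining the collected parts at the end.
import Mathlib
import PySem

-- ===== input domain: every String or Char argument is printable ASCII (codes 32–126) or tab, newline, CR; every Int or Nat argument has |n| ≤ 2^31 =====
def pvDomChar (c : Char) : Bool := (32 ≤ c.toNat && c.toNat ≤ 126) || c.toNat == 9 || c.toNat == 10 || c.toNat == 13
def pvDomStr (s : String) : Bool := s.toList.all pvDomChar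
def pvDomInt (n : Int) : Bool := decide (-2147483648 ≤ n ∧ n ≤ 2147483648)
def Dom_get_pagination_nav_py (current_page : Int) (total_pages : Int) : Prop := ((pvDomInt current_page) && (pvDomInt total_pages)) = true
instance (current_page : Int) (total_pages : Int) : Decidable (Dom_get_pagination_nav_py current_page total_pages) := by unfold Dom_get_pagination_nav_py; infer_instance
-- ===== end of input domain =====

-- B is a simpler decomposition of A: it precomputes the list of displayed page numbers and
-- renders it in one gap-driven pass (ellipsis where neighbours differ by more than 1).

-- ===== PORT A =====
def get_pagination_nav_py (current_page : Int) (total_pages : Int) : String :=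
  if total_pages ≤ 1 then ""
  else
    let nav := "<div class='pagination'>"
    let nav := if current_page > 1 then nav ++ "<a href='_page-" ++ PySem.Int.toStr (current_page - 1) ++ ".html'>&larr; Previous</a>" else nav
    let nav :=
      if total_pages ≤ 7 then
        (PySem.List.pyRange 1 (total_pages + 1) 1).foldl
          (fun nav i => nav ++ "<a href='_page-" ++ PySem.Int.toStr i ++ ".html' class='" ++ (if i == current_page then "current-page" else "") ++ "'>" ++ PySem.Int.toStr i ++ "</a>") nav
      else
        let nav := nav ++ "<a href='_page-1.html' class='" ++ (if (1 : Int) == current_page then "current-page" else "") ++ "'>1</a>"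
        let nav := if current_page > 4 then nav ++ "<span class='ellipsis'>...</span>" else nav
        let start := max 2 (current_page - 2)
        let stop := min (total_pages - 1) (current_page + 2)
        let nav := (PySem.List.pyRange start (stop + 1) 1).foldl
          (fun nav i => nav ++ "<a href='_page-" ++ PySem.Int.toStr i ++ ".html' class='" ++ (if i == current_page then "current-page" else "") ++ "'>" ++ PySem.Int.toStr i ++ "</a>") nav
        let nav := if current_page < total_pages - 3 then nav ++ "<span class='ellipsis'>...</span>" else nav
        nav ++ "<a href='_page-" ++ PySem.Int.toStr total_pages ++ ".html' class='" ++ (if total_pages == current_page then "current-page" else "") ++ "'>" ++ PySem.Int.toStr total_pages ++ "</a>"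
    let nav := if current_page < total_pages then nav ++ "<a href='_page-" ++ PySem.Int.toStr (current_page + 1) ++ ".html'>Next &rarr;</a>" else nav
    nav ++ "</div>"

-- ===== PORT B =====
-- helper 'link' of Source B
def pvLinkB (current_page : Int) (i : Int) : String :=
  let cls := if i == current_page then "current-page" else ""
  "<a href='_page-" ++ PySem.Int.toStr i ++ ".html' class='" ++ cls ++ "'>" ++ PySem.Int.toStr i ++ "</a>"

def get_pagination_nav_py_alt (current_page : Int) (total_pages : Int) : String :=
  if total_pages ≤ 1 then ""
  else
    let pages : List Int :=
      if total_pages ≤ 7 then PySem.List.pyRange 1 (total_pages + 1) 1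
      else [1] ++ PySem.List.pyRange (max 2 (current_page - 2)) (min (total_pages - 1) (current_page + 2) + 1) 1 ++ [total_pages]
    let parts : List String := ["<div class='pagination'>"]
    let parts := if current_page > 1 then parts ++ ["<a href='_page-" ++ PySem.Int.toStr (current_page - 1) ++ ".html'>&larr; Previous</a>"] else parts
    -- pages[0]; pages is nonempty here (total_pages ≥ 2), so the default is never used
    let parts := parts ++ [pvLinkB current_page (PySem.List.pyGetD pages 0 0)]
    -- for prev, p in zip(pages, pages[1:]):  (pages[1:] = pages.tail, exact for any list)
    let parts := (List.zip pages pages.tail).foldl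
        (fun parts pq => (if pq.2 - pq.1 > 1 then parts ++ ["<span class='ellipsis'>...</span>"] else parts) ++ [pvLinkB current_page pq.2]) parts
    let parts := if current_page < total_pages then parts ++ ["<a href='_page-" ++ PySem.Int.toStr (current_page + 1) ++ ".html'>Next &rarr;</a>"] else parts
    let parts := parts ++ ["</div>"]
    PySem.Str.join "" parts

-- ===== PRECONDITION & SPEC =====
def Spec_get_pagination_nav_py (current_page : Int) (total_pages : Int) (out : String) : Prop := out = get_pagination_nav_py_alt current_page total_pages
instance (current_page : Int) (total_pages : Int) (out : String) : Decidable (Spec_get_pagination_nav_py current_page total_pages out) := by unfold Spec_get_pagination_nav_py; infer_instance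

-- ===== CLAIM (what is proved, stated in full; the proofs are below) =====
def Claim_equal_get_pagination_nav_py : Prop := ∀ (current_page : Int) (total_pages : Int), Dom_get_pagination_nav_py current_page total_pages → Spec_get_pagination_nav_py current_page total_pages (get_pagination_nav_py current_page total_pages)

-- ===== LEMMAS AND PROOFS =====

theorem pvJoin_nil : PySem.Str.join "" [] = "" := by decide

theorem pvJoin_cons (p : String) (rest : List String) :
    PySem.Str.join "" (p :: rest) = p ++ PySem.Str.join "" rest := by
  have h : ∀ (q : List Char) (r : List (List Char)), ([] : List Char).intercalate (q :: r) = q ++ [].intercalate r := by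
    intro q r; cases r <;> simp [List.intercalate]
  simp [PySem.Str.join, PySem.Chars.join, h]

theorem pvJoin_append (xs ys : List String) :
    PySem.Str.join "" (xs ++ ys) = PySem.Str.join "" xs ++ PySem.Str.join "" ys := by
  induction xs with
  | nil => simp [pvJoin_nil]
  | cons p rest ih => simp [pvJoin_cons, ih, String.append_assoc]

theorem pvLink_one (c : Int) :
    pvLinkB c 1 = "<a href='_page-1.html' class='" ++ (if (1 : Int) == c then "current-page" else "") ++ "'>1</a>" := by
  unfold pvLinkB
  cases ((1 : Int) == c) <;> simp only [if_true, if_false, Bool.false_eq_true] <;> decide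

-- A's page-number loop, as init ++ joined links
theorem pvAfold (c : Int) (l : List Int) : ∀ nav : String,
    l.foldl (fun nav i => nav ++ "<a href='_page-" ++ PySem.Int.toStr i ++ ".html' class='" ++ (if i == c then "current-page" else "") ++ "'>" ++ PySem.Int.toStr i ++ "</a>") nav
      = nav ++ PySem.Str.join "" (l.map (pvLinkB c)) := by
  induction l with
  | nil => intro nav; simp [pvJoin_nil]
  | cons a rest ih =>
      intro nav
      simp only [List.foldl_cons, List.map_cons, pvJoin_cons, ih]
      simp [pvLinkB, String.append_assoc]

-- B's pair loop over a run of consecutive pages emits no ellipses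
theorem pvPairRun (c : Int) : ∀ (n : Nat) (a : Int) (l : List Int) (parts : List String),
    (List.zip (a :: (PySem.List.pyRange (a+1) (a+1+n) 1 ++ l)) (PySem.List.pyRange (a+1) (a+1+n) 1 ++ l)).foldl
        (fun parts pq => (if pq.2 - pq.1 > 1 then parts ++ ["<span class='ellipsis'>...</span>"] else parts) ++ [pvLinkB c pq.2]) parts
      = (List.zip ((a+n) :: l) l).foldl
        (fun parts pq => (if pq.2 - pq.1 > 1 then parts ++ ["<span class='ellipsis'>...</span>"] else parts) ++ [pvLinkB c pq.2])
        (parts ++ (PySem.List.pyRange (a+1) (a+1+n) 1).map (pvLinkB c)) := by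
  intro n
  induction n with
  | zero =>
      intro a l parts
      simp [PySem.List.pyRange_one_eq_nil (le_refl (a+1))]
  | succ n ih =>
      intro a l parts
      have hc : PySem.List.pyRange (a+1) (a+1+((n+1 : Nat) : Int)) 1
          = (a+1) :: PySem.List.pyRange ((a+1)+1) (a+1+((n+1 : Nat) : Int)) 1 :=
        PySem.List.pyRange_one_cons (by push_cast; omega)
      have he : a+1+((n+1 : Nat) : Int) = (a+1)+1+(n : Nat) := by push_cast; ring
      rw [hc, he]
      simp only [List.cons_append, List.zip_cons_cons, List.foldl_cons]
      rw [ih (a+1) l]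
      have hgap : ¬ ((a+1) - a > 1) := by omega
      simp only [hgap, if_false]
      have hz : (a+1)+(n : Nat) = a+((n+1 : Nat) : Int) := by push_cast; ring
      rw [hz]
      simp [List.append_assoc]

theorem pvPairRun_nil (c : Int) (n : Nat) (a : Int) (parts : List String) :
    (List.zip (a :: PySem.List.pyRange (a+1) (a+1+n) 1) (PySem.List.pyRange (a+1) (a+1+n) 1)).foldl
        (fun parts pq => (if pq.2 - pq.1 > 1 then parts ++ ["<span class='ellipsis'>...</span>"] else parts) ++ [pvLinkB c pq.2]) parts
      = parts ++ (PySem.List.pyRange (a+1) (a+1+n) 1).map (pvLinkB c) := by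
  have h := pvPairRun c n a [] parts
  simpa using h

-- ===== VERDICT (by name: the statement is the Claim_ definition above) =====
set_option maxHeartbeats 2000000 in
theorem get_pagination_nav_py_spec : Claim_equal_get_pagination_nav_py := by
  intro c tp _
  unfold Spec_get_pagination_nav_py get_pagination_nav_py get_pagination_nav_py_alt
  by_cases h1 : tp ≤ 1
  · simp [h1]
  · by_cases h7 : tp ≤ 7
    · -- 2 ≤ tp ≤ 7 : all pages, one consecutive run
      have hr : PySem.List.pyRange 1 (tp+1) 1 = 1 :: PySem.List.pyRange 2 (tp+1) 1 :=
        PySem.List.pyRange_one_cons (by omega)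
      have hn : PySem.List.pyRange 2 (tp+1) 1 = PySem.List.pyRange (1+1) (1+1+((tp-1).toNat : Int)) 1 := by
        congr 1 <;> omega
      simp only [h1, h7, if_true, if_false, hr, List.tail_cons, List.cons_append, List.nil_append]
      rw [pvAfold, hn, pvPairRun_nil]
      have hd : PySem.List.pyGetD (1 :: PySem.List.pyRange (1+1) (1+1+((tp-1).toNat : Int)) 1) 0 0 = 1 := by
        simp [PySem.List.pyGetD]
      rw [hd, ← hn]
      simp only [List.map_cons]
      split_ifs <;>
        simp [pvJoin_append, pvJoin_cons, pvJoin_nil, pvLinkB, String.append_assoc] <;>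
        simp [← String.append_assoc]
    · -- tp ≥ 8
      have h8 : (8 : Int) ≤ tp := by omega
      simp only [h1, h7, if_false]
      by_cases hme : min (tp-1) (c+2) < max 2 (c-2)
      · -- the window is empty: pages = [1, tp]
        have hnil : PySem.List.pyRange (max 2 (c-2)) (min (tp-1) (c+2) + 1) 1 = [] :=
          PySem.List.pyRange_one_eq_nil (by omega)
        have hgap : tp - 1 > 1 := by omega
        rw [hnil]
        simp only [List.nil_append, List.cons_append, List.tail_cons, List.foldl_nil,
          List.zip_cons_cons, List.zip_nil_right, List.foldl_cons, hgap, if_true]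
        have hd : PySem.List.pyGetD [1, tp] 0 0 = 1 := by simp [PySem.List.pyGetD]
        rw [hd, pvLink_one]
        simp only [pvLinkB]
        split_ifs <;> first
          | omega
          | (simp [pvJoin_cons, pvJoin_nil, String.append_assoc] <;>
             simp [← String.append_assoc])
      · -- nonempty window [s, e]
        have hs : PySem.List.pyRange (max 2 (c-2)) (min (tp-1) (c+2) + 1) 1
            = max 2 (c-2) :: PySem.List.pyRange (max 2 (c-2) + 1) (min (tp-1) (c+2) + 1) 1 :=
          PySem.List.pyRange_one_cons (by omega)
        have hn2 : PySem.List.pyRange (max 2 (c-2) + 1) (min (tp-1) (c+2) + 1) 1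
            = PySem.List.pyRange (max 2 (c-2) + 1) (max 2 (c-2) + 1 + ((min (tp-1) (c+2) - max 2 (c-2)).toNat : Int)) 1 := by
          congr 1; omega
        rw [hs, hn2]
        simp only [List.nil_append, List.cons_append, List.tail_cons, List.zip_cons_cons, List.foldl_cons]
        rw [pvPairRun]
        have hz : max 2 (c-2) + ((min (tp-1) (c+2) - max 2 (c-2)).toNat : Int) = min (tp-1) (c+2) := by omega
        rw [hz, ← hn2, pvAfold]
        simp only [List.zip_cons_cons, List.zip_nil_right, List.foldl_cons, List.foldl_nil]
        have hd : ∀ (r : List Int), PySem.List.pyGetD (1 :: r) 0 0 = 1 := by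
          intro r; simp [PySem.List.pyGetD]
        rw [hd, pvLink_one]
        have hg1 : (max 2 (c-2) - 1 > 1) ↔ (c > 4) := by omega
        have hg2 : (tp - min (tp-1) (c+2) > 1) ↔ (c < tp - 3) := by omega
        simp only [hg1, hg2, pvLinkB]
        split_ifs <;> first
          | omega
          | (simp [pvJoin_append, pvJoin_cons, pvJoin_nil, String.append_assoc] <;>
             simp [← String.append_assoc])
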